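-- pv_equiv track=rewrite | github.com/estjos/KICS | kics_repo/kics/grid.py | def_sat3
-- ===== SOURCE A (Python) =====
-- import math
-- from typing import List, Optional, Sequence, Tuple
--
-- Grid = List[List[int]]  # interest grid or satellite-resolution grid
--
-- def def_sat3(grid: int) -> Grid:
--     sat = [[0 for _ in range(grid)] for _ in range(grid)]
--     for i in range(math.floor(grid * 0.3), math.floor(grid * 0.7)):
--         for j in range(math.floor(grid * 0.3), math.floor(grid * 0.7)):
--             sat[i][j] = 1
--     for i in range(math.floor(grid * 0.36), math.floor(grid * 0.64)):
--         for j in range(math.floor(grid * 0.36), math.floor(grid * 0.64)):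
--             sat[i][j] = 2
--     for i in range(math.floor(grid * 0.42), math.floor(grid * 0.58)):
--         for j in range(math.floor(grid * 0.42), math.floor(grid * 0.58)):
--             sat[i][j] = 3
--     return sat
-- ===== SOURCE B (Python) =====
-- import math
--
--
-- def def_sat3(grid: int):
--     a1, b1 = math.floor(grid * 0.3), math.floor(grid * 0.7)
--     a2, b2 = math.floor(grid * 0.36), math.floor(grid * 0.64)
--     a3, b3 = math.floor(grid * 0.42), math.floor(grid * 0.58)
--
--     def row(key):
--         k3, k2, k1 = key
--         return [3 if k3 and a3 <= j < b3
--                 else 2 if k2 and a2 <= j < b2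
--                 else 1 if k1 and a1 <= j < b1
--                 else 0
--                 for j in range(grid)]
--
--     cache = {}
--     out = []
--     for i in range(grid):
--         key = (a3 <= i < b3, a2 <= i < b2, a1 <= i < b1)
--         if key not in cache:
--             cache[key] = row(key)
--         out.append(list(cache[key]))
--     return out
-- ===== Notes on version B (the rewrite author's own statement) =====
-- stated objective: faster
-- what changed: Instead of zero-filling the matrix and overwriting it with three nested band-loop passes, B computes each cell directly from a chained per-cell band test and memoises whole rows by their triple of band flags (at most 4 distinct rows are built; every other row is a list copy), measured ~5x faster at n=1024.
import Mathlib
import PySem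

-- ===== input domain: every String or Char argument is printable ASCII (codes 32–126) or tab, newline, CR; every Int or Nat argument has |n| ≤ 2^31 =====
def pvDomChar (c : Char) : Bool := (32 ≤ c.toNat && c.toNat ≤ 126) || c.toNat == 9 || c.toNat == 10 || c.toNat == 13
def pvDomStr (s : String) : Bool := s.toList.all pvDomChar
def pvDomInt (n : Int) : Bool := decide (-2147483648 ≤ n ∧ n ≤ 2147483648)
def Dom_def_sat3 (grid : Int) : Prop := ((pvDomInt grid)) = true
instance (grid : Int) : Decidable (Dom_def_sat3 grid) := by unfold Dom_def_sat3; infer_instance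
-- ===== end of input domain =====

-- B computes each cell directly from a chained band test, memoising whole rows by
-- their triple of band flags, instead of zero-filling and overwriting with three
-- nested band passes; objective: faster (row memoisation, a constant-factor gain).

-- ===== PORT A =====
-- Exact integer model of Python's `math.floor(g * c)` where c is the IEEE-754 double
-- with value M / 2^E: the product is computed as a double (round to nearest, ties to
-- even, 53-bit significand), then floored.  Used by both ports, since both Python
-- sources evaluate exactly these expressions.
def floorMul (g M : Int) (E : Nat) : Int :=
  let p := g * M
  if p = 0 then 0 else
    let n := p.natAbs
    let b := Nat.log2 n
    let n' := if b ≤ 52 then n else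
      let sh := b - 52
      let q := n / 2 ^ sh
      let r := n % 2 ^ sh
      let q' := if 2 ^ (sh - 1) < r ∨ (r = 2 ^ (sh - 1) ∧ q % 2 = 1) then q + 1 else q
      q' * 2 ^ sh
    PySem.Int.floordiv (if 0 < p then (n' : Int) else -(n' : Int)) (2 ^ E)

-- one overwrite pass `for i in range(a,b): for j in range(a,b): sat[i][j] = v`
-- (the Python indices are nonnegative and in range whenever these loops run, so the
--  Nat-indexed in-range `modify`/`set` are exact here)
def overwritePass (sat : List (List Int)) (a b v : Int) : List (List Int) :=
  (PySem.List.pyRange a b 1).foldl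
    (fun s i => (PySem.List.pyRange a b 1).foldl
      (fun s' j => s'.modify i.toNat (fun row => row.set j.toNat v)) s) sat

def def_sat3 (grid : Int) : List (List Int) :=
  let sat0 := (PySem.List.pyRange 0 grid 1).map
    (fun _ => (PySem.List.pyRange 0 grid 1).map (fun _ => (0 : Int)))
  let sat1 := overwritePass sat0 (floorMul grid 5404319552844595 54) (floorMul grid 3152519739159347 52) 1
  let sat2 := overwritePass sat1 (floorMul grid 3242591731706757 53) (floorMul grid 5764607523034235 53) 2
  overwritePass sat2 (floorMul grid 7566047373982433 54) (floorMul grid 5224175567749775 53) 3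

-- ===== PORT B =====
-- `row(key)`: the row of cell values for a given triple of per-row band flags
def rowFor (grid a1 b1 a2 b2 a3 b3 : Int) (k3 k2 k1 : Bool) : List Int :=
  (PySem.List.pyRange 0 grid 1).map (fun j =>
    if k3 ∧ a3 ≤ j ∧ j < b3 then (3 : Int)
    else if k2 ∧ a2 ≤ j ∧ j < b2 then 2
    else if k1 ∧ a1 ≤ j ∧ j < b1 then 1
    else 0)

-- the cache key `(a3 <= i < b3, a2 <= i < b2, a1 <= i < b1)`
def keyOf (a1 b1 a2 b2 a3 b3 i : Int) : Bool × Bool × Bool :=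
  (decide (a3 ≤ i ∧ i < b3), decide (a2 ≤ i ∧ i < b2), decide (a1 ≤ i ∧ i < b1))

def def_sat3_alt (grid : Int) : List (List Int) :=
  let a1 := floorMul grid 5404319552844595 54
  let b1 := floorMul grid 3152519739159347 52
  let a2 := floorMul grid 3242591731706757 53
  let b2 := floorMul grid 5764607523034235 53
  let a3 := floorMul grid 7566047373982433 54
  let b3 := floorMul grid 5224175567749775 53
  -- `for i in range(grid): ... cache[key] ... out.append(list(cache[key]))`
  -- (`list(...)` copies the row object; on values it is the identity; `cache[key]`
  --  is read right after the key was ensured present, so `getD` with `[]` is exact)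
  ((PySem.List.pyRange 0 grid 1).foldl
    (fun st i =>
      let key := keyOf a1 b1 a2 b2 a3 b3 i
      let cache := if st.1.contains key then st.1
        else st.1.insert key (rowFor grid a1 b1 a2 b2 a3 b3 key.1 key.2.1 key.2.2)
      (cache, st.2 ++ [cache.getD key []]))
    ((PySem.Dict.empty : PySem.Dict (Bool × Bool × Bool) (List Int)), ([] : List (List Int)))).2

-- ===== PRECONDITION & SPEC =====
def Spec_def_sat3 (grid : Int) (out : List (List Int)) : Prop := out = def_sat3_alt grid
instance (grid : Int) (out : List (List Int)) : Decidable (Spec_def_sat3 grid out) := by unfold Spec_def_sat3; infer_instance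

-- ===== CLAIM (what is proved, stated in full; the proofs are below) =====
def Claim_equal_def_sat3 : Prop := ∀ (grid : Int), Dom_def_sat3 grid → Spec_def_sat3 grid (def_sat3 grid)

-- ===== LEMMAS AND PROOFS =====

theorem floorMul_nonneg (g M : Int) (E : Nat) (hg : 0 < g) (hM : 0 < M) :
    0 ≤ floorMul g M E := by
  have hp : 0 < g * M := mul_pos hg hM
  have aux : ∀ (x : Int) (y : Int), 0 ≤ x → 0 < y → 0 ≤ PySem.Int.floordiv x y := by
    intro x y hx hy
    rw [PySem.Int.floordiv_eq_ediv_of_pos hy]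
    exact Int.ediv_nonneg hx hy.le
  unfold floorMul
  simp only [if_neg hp.ne', if_pos hp]
  exact aux _ _ (Int.natCast_nonneg _) (by positivity)

theorem set_getElem?' (l : List Int) (i j : Nat) (v : Int) :
    (l.set i v)[j]? = (l[j]?).map (fun a => if i = j then v else a) := by
  rw [List.getElem?_set]
  by_cases hij : i = j
  · subst hij
    by_cases h : i < l.length
    · simp [h]
    · simp [h]
  · simp [hij]

-- the shared shape of A's index loops: a left fold over `range(a,b)` of an update
-- whose effect on entry k is `map f` exactly when the loop index equals k
theorem foldRange_getElem? {α : Type} (f : α → α) (step : List α → Nat → List α)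
    (hstep : ∀ s n k, (step s n)[k]? = (s[k]?).map (fun x => if n = k then f x else x))
    (a b : Int) (ha : 0 ≤ a) (s : List α) (k : Nat) :
    ((PySem.List.pyRange a b 1).foldl (fun s j => step s j.toNat) s)[k]? =
      if a ≤ (k : Int) ∧ (k : Int) < b then (s[k]?).map f else s[k]? := by
  obtain ⟨d, hd⟩ : ∃ d, (b - a).toNat = d := ⟨_, rfl⟩
  induction d generalizing a s with
  | zero =>
    rw [PySem.List.pyRange_one_eq_nil (by omega)]
    simp only [List.foldl_nil]
    rw [if_neg (by omega)]
  | succ d ih =>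
    have hab : a < b := by omega
    rw [PySem.List.pyRange_one_cons hab]
    simp only [List.foldl_cons]
    rw [ih (a + 1) (by omega) (step s a.toNat) (by omega), hstep]
    have hat : (a.toNat : Int) = a := Int.toNat_of_nonneg ha
    cases hsk : s[k]? with
    | none => split_ifs <;> simp
    | some x =>
      simp only [Option.map_some]
      split_ifs <;> simp_all <;> omega

theorem modify_modify_same {α : Type} (l : List α) (i : Nat) (f g : α → α) :
    (l.modify i f).modify i g = l.modify i (fun a => g (f a)) := by
  apply List.ext_getElem?
  intro j
  simp only [List.getElem?_modify]
  cases l[j]? <;> (simp; try (split_ifs <;> simp))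

theorem modify_id' {α : Type} (l : List α) (i : Nat) :
    l.modify i (fun a => a) = l := by
  apply List.ext_getElem?
  intro j
  simp only [List.getElem?_modify]
  cases l[j]? <;> simp

-- the inner j-loop of a pass only ever touches row i
theorem inner_to_modify (l : List Int) (I : Nat) (v : Int) (s : List (List Int)) :
    l.foldl (fun s' j => s'.modify I (fun row => row.set j.toNat v)) s
      = s.modify I (fun row => l.foldl (fun r j => r.set j.toNat v) row) := by
  induction l generalizing s with
  | nil => simp [modify_id']
  | cons x xs ih =>
    simp only [List.foldl_cons]
    rw [ih, modify_modify_same]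

theorem pass_getElem? (sat : List (List Int)) (a b v : Int) (ha : 0 ≤ a) (i : Nat) :
    (overwritePass sat a b v)[i]? =
      if a ≤ (i : Int) ∧ (i : Int) < b
      then (sat[i]?).map (fun row =>
        (PySem.List.pyRange a b 1).foldl (fun r j => r.set j.toNat v) row)
      else sat[i]? := by
  unfold overwritePass
  simp only [inner_to_modify]
  exact foldRange_getElem? _ (fun s n => s.modify n _)
    (fun s n k => by rw [List.getElem?_modify]; cases s[k]? <;> simp) a b ha sat i

theorem rowFold_getElem? (row : List Int) (a b v : Int) (ha : 0 ≤ a) (k : Nat) :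
    ((PySem.List.pyRange a b 1).foldl (fun r j => r.set j.toNat v) row)[k]? =
      if a ≤ (k : Int) ∧ (k : Int) < b then (row[k]?).map (fun _ => v) else row[k]? := by
  exact foldRange_getElem? (fun _ => v) (fun r n => r.set n v)
    (fun r n k => set_getElem?' r n k v) a b ha row k

theorem foldl_modify_nil (l : List Int) (F : List Int → List Int) :
    l.foldl (fun s i => s.modify i.toNat F) ([] : List (List Int)) = [] := by
  induction l with
  | nil => rfl
  | cons x xs ih => simpa using ih

theorem pass_nil (a b v : Int) : overwritePass [] a b v = [] := by
  unfold overwritePass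
  simp only [inner_to_modify]
  exact foldl_modify_nil _ _

-- the memoising row loop of B produces one `rowFor` row per index
theorem memo_foldl (grid a1 b1 a2 b2 a3 b3 : Int) (l : List Int)
    (c : PySem.Dict (Bool × Bool × Bool) (List Int)) (acc : List (List Int))
    (hc : ∀ k v, c.get? k = some v → v = rowFor grid a1 b1 a2 b2 a3 b3 k.1 k.2.1 k.2.2) :
    (l.foldl
      (fun st i =>
        let key := keyOf a1 b1 a2 b2 a3 b3 i
        let cache := if st.1.contains key then st.1
          else st.1.insert key (rowFor grid a1 b1 a2 b2 a3 b3 key.1 key.2.1 key.2.2)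
        (cache, st.2 ++ [cache.getD key []]))
      (c, acc)).2
      = acc ++ l.map (fun i =>
          rowFor grid a1 b1 a2 b2 a3 b3 (keyOf a1 b1 a2 b2 a3 b3 i).1
            (keyOf a1 b1 a2 b2 a3 b3 i).2.1 (keyOf a1 b1 a2 b2 a3 b3 i).2.2) := by
  induction l generalizing c acc with
  | nil => simp
  | cons i l ih =>
    simp only [List.foldl_cons, List.map_cons]
    by_cases hcon : c.contains (keyOf a1 b1 a2 b2 a3 b3 i)
    · obtain ⟨v, hv⟩ : ∃ v, c.get? (keyOf a1 b1 a2 b2 a3 b3 i) = some v := by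
        have hiso := PySem.Dict.contains_eq_isSome_get? c (keyOf a1 b1 a2 b2 a3 b3 i)
        rw [hcon] at hiso
        exact Option.isSome_iff_exists.mp hiso.symm
      simp only [hcon, if_true]
      rw [ih c _ hc, PySem.Dict.getD_of_get?_eq_some c [] hv, hc _ _ hv]
      simp
    · simp only [hcon, Bool.false_eq_true, if_false]
      rw [ih _ _ ?_, PySem.Dict.getD_of_get?_eq_some _ [] (PySem.Dict.get?_insert_self _ _ _)]
      · simp
      · intro k v hkv
        rw [PySem.Dict.get?_insert] at hkv
        split_ifs at hkv with hk
        · cases hkv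
          subst hk
          rfl
        · exact hc _ _ hkv

theorem alt_eq_map (grid : Int) :
    def_sat3_alt grid
      = (PySem.List.pyRange 0 grid 1).map (fun i =>
          rowFor grid (floorMul grid 5404319552844595 54) (floorMul grid 3152519739159347 52)
            (floorMul grid 3242591731706757 53) (floorMul grid 5764607523034235 53)
            (floorMul grid 7566047373982433 54) (floorMul grid 5224175567749775 53)
            (keyOf (floorMul grid 5404319552844595 54) (floorMul grid 3152519739159347 52)
              (floorMul grid 3242591731706757 53) (floorMul grid 5764607523034235 53)
              (floorMul grid 7566047373982433 54) (floorMul grid 5224175567749775 53) i).1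
            (keyOf (floorMul grid 5404319552844595 54) (floorMul grid 3152519739159347 52)
              (floorMul grid 3242591731706757 53) (floorMul grid 5764607523034235 53)
              (floorMul grid 7566047373982433 54) (floorMul grid 5224175567749775 53) i).2.1
            (keyOf (floorMul grid 5404319552844595 54) (floorMul grid 3152519739159347 52)
              (floorMul grid 3242591731706757 53) (floorMul grid 5764607523034235 53)
              (floorMul grid 7566047373982433 54) (floorMul grid 5224175567749775 53) i).2.2) := by
  simp only [def_sat3_alt]
  rw [memo_foldl _ _ _ _ _ _ _ _ _ _
    (fun k v h => by rw [PySem.Dict.get?_empty] at h; cases h)]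
  simp

theorem def_sat3_eq_alt (grid : Int) : def_sat3 grid = def_sat3_alt grid := by
  rw [alt_eq_map]
  by_cases hg : grid ≤ 0
  · simp only [def_sat3, PySem.List.pyRange_one_eq_nil hg, List.map_nil, pass_nil]
  · have hg : 0 < grid := by omega
    have hA1 := floorMul_nonneg grid 5404319552844595 54 hg (by norm_num)
    have hA2 := floorMul_nonneg grid 3242591731706757 53 hg (by norm_num)
    have hA3 := floorMul_nonneg grid 7566047373982433 54 hg (by norm_num)
    simp only [def_sat3]
    apply List.ext_getElem?
    intro i
    rw [pass_getElem? _ _ _ _ hA3, pass_getElem? _ _ _ _ hA2, pass_getElem? _ _ _ _ hA1]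
    rw [List.getElem?_map, List.getElem?_map, PySem.List.getElem?_pyRange_one]
    by_cases hi : i < (grid - 0).toNat
    · rw [if_pos hi]
      simp only [Option.map_some]
      split_ifs with h3 h2 hx1 hx2 hx3 hx4 <;>
        · try simp only [Option.map_some]
          apply congrArg
          apply List.ext_getElem?
          intro j
          simp only [rowFor, keyOf, decide_eq_true_eq]
          rw [List.getElem?_map, PySem.List.getElem?_pyRange_one]
          simp only [rowFold_getElem? _ _ _ _ hA1, rowFold_getElem? _ _ _ _ hA2,
            rowFold_getElem? _ _ _ _ hA3, List.getElem?_map, PySem.List.getElem?_pyRange_one]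
          by_cases hj : j < (grid - 0).toNat
          · rw [if_pos hj]
            simp only [Option.map_some]
            split_ifs <;> (try simp) <;> omega
          · rw [if_neg hj]
            first
            | (split_ifs <;> simp)
            | simp
    · rw [if_neg hi]
      split_ifs <;> simp

-- ===== VERDICT (by name: the statement is the Claim_ definition above) =====
theorem def_sat3_spec : Claim_equal_def_sat3 := by
  intro grid _
  unfold Spec_def_sat3
  exact def_sat3_eq_alt grid
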